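-- pv_equiv track=rewrite | github.com/lmmontoya-ai/mats-9.0-application | models.py | find_model_response_start
-- ===== SOURCE A (Python) =====
-- from typing import Any, Dict, List, Optional, Tuple, Callable
--
-- def find_model_response_start(toks: List[str], templated: bool = True) -> int:
--     if not templated:
--         if any(tok == "<start_of_turn>" for tok in toks):
--             templated = True
--         else:
--             return 0
--     idxs = [i for i, tok in enumerate(toks) if tok == "<start_of_turn>"]
--     if len(idxs) >= 2:
--         return idxs[1] + 3  # after <start_of_turn>, role, bos
--     return 0
-- ===== SOURCE B (Python) =====
-- def find_model_response_start(toks, templated=True):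
--     marker = "<start_of_turn>"
--     try:
--         first = toks.index(marker)
--         second = toks.index(marker, first + 1)
--     except ValueError:
--         return 0
--     return second + 3
-- ===== Notes on version B (the rewrite author's own statement) =====
-- stated objective: idiomatic
-- what changed: Replaces the any() pre-scan and full index-list comprehension with two list.index searches (first occurrence, then the next occurrence starting past it) under try/except ValueError; the templated flag is dropped since it never affects the result.
import Mathlib
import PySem

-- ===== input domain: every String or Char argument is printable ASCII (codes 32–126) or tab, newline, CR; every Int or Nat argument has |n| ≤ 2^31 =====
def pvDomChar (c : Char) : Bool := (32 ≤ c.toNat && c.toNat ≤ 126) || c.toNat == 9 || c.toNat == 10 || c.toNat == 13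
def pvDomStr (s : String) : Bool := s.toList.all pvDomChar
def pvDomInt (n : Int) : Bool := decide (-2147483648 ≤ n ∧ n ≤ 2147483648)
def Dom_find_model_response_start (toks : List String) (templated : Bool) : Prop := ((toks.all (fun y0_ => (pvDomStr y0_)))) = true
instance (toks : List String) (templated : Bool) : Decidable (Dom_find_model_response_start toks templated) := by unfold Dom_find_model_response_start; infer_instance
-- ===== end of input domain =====

-- ===== PORT A =====
-- B locates the first marker with list.index and then searches again starting past it
-- (try/except ValueError), instead of A's any() pre-scan plus full index-list comprehension (objective: idiomatic).
-- idxs = [i for i, tok in enumerate(toks) if tok == "<start_of_turn>"]; then idxs[1] + 3 if len(idxs) >= 2 else 0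
def pvTailA (toks : List String) : Int :=
  let idxs := ((PySem.List.enumerate toks 0).filter (fun p => p.2 == "<start_of_turn>")).map (fun p => p.1)
  if 2 ≤ idxs.length then idxs[1]! + 3 else 0

def find_model_response_start (toks : List String) (templated : Bool) : Int :=
  if !templated then
    if toks.any (fun tok => tok == "<start_of_turn>") then pvTailA toks
    else 0
  else pvTailA toks

-- ===== PORT B =====
-- toks.index(marker) is PySem.List.index?; toks.index(marker, first+1) — index with a start
-- argument — is ported exactly as index? on the suffix toks[first+1:] with the offset added back;
-- ValueError (none) in either search yields the except branch's 0.
def find_model_response_start_alt (toks : List String) (templated : Bool) : Int :=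
  match PySem.List.index? toks "<start_of_turn>" with
  | none => 0
  | some first =>
    match PySem.List.index? (toks.drop (first + 1)) "<start_of_turn>" with
    | none => 0
    | some s => ((first : Int) + 1 + (s : Int)) + 3

-- ===== PRECONDITION & SPEC =====
def Spec_find_model_response_start (toks : List String) (templated : Bool) (out : Int) : Prop := out = find_model_response_start_alt toks templated
instance (toks : List String) (templated : Bool) (out : Int) : Decidable (Spec_find_model_response_start toks templated out) := by unfold Spec_find_model_response_start; infer_instance

-- ===== CLAIM (what is proved, stated in full; the proofs are below) =====
def Claim_equal_find_model_response_start : Prop := ∀ (toks : List String) (templated : Bool), Dom_find_model_response_start toks templated → Spec_find_model_response_start toks templated (find_model_response_start toks templated)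

-- ===== LEMMAS AND PROOFS =====
-- the filtered-index list of A, starting at offset i
def pvIdxs (toks : List String) (i : Int) : List Int :=
  ((PySem.List.enumerate toks i).filter (fun p => p.2 == "<start_of_turn>")).map (fun p => p.1)

theorem pvIdxs_cons (tok : String) (rest : List String) (i : Int) :
    pvIdxs (tok :: rest) i =
      if tok == "<start_of_turn>" then i :: pvIdxs rest (i + 1) else pvIdxs rest (i + 1) := by
  simp only [pvIdxs, PySem.List.enumerate_cons, List.filter_cons]
  split <;> simp

-- A's index list decomposes along B's first index? search
theorem pvIdxs_struct (toks : List String) (i : Int) :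
    pvIdxs toks i =
      match PySem.List.index? toks "<start_of_turn>" with
      | none => []
      | some f => (i + f) :: pvIdxs (toks.drop (f + 1)) (i + f + 1) := by
  induction toks generalizing i with
  | nil => rfl
  | cons tok rest ih =>
    rw [pvIdxs_cons]
    by_cases h : tok = "<start_of_turn>"
    · subst h
      rw [if_pos (by simp), PySem.List.index?_cons_self]
      simp
    · rw [if_neg (by simpa using h), PySem.List.index?_cons_of_ne rest h, ih (i + 1)]
      cases PySem.List.index? rest "<start_of_turn>" with
      | none => rfl
      | some f =>
        simp only [Option.map_some, List.drop_succ_cons]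
        congr 1
        · push_cast; ring
        · congr 1
          push_cast; ring

theorem pvTailA_eq_idxs (toks : List String) :
    pvTailA toks = (match pvIdxs toks 0 with | _ :: x :: _ => x + 3 | _ => 0) := by
  rw [pvTailA]
  show (if 2 ≤ (pvIdxs toks 0).length then (pvIdxs toks 0)[1]! + 3 else 0) = _
  match h : pvIdxs toks 0 with
  | [] => simp
  | [x] => simp
  | _ :: x :: _ => simp

theorem pvTailA_eq_alt (toks : List String) (templated : Bool) :
    pvTailA toks = find_model_response_start_alt toks templated := by
  rw [pvTailA_eq_idxs, find_model_response_start_alt, pvIdxs_struct]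
  cases hf : PySem.List.index? toks "<start_of_turn>" with
  | none => rfl
  | some f =>
    simp only
    rw [pvIdxs_struct]
    cases hs : PySem.List.index? (toks.drop (f + 1)) "<start_of_turn>" with
    | none => rfl
    | some s =>
      simp only
      ring_nf

-- ===== VERDICT (by name: the statement is the Claim_ definition above) =====
theorem find_model_response_start_spec : Claim_equal_find_model_response_start := by
  intro toks templated _
  unfold Spec_find_model_response_start find_model_response_start
  cases templated with
  | true => simpa using pvTailA_eq_alt toks true
  | false =>
    simp only [Bool.not_false, if_pos]
    cases h : toks.any (fun tok => tok == "<start_of_turn>") with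
    | true => simpa using pvTailA_eq_alt toks false
    | false =>
      rw [find_model_response_start_alt]
      cases hf : PySem.List.index? toks "<start_of_turn>" with
      | none => rfl
      | some f =>
        exfalso
        have hmem : "<start_of_turn>" ∈ toks :=
          (PySem.List.index?_isSome_iff toks "<start_of_turn>").mp (by rw [hf]; rfl)
        simp [List.any_eq_false] at h
        exact h _ hmem rfl
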